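-- pv_equiv track=rewrite | github.com/yannickloth/W33-Theory | scripts/w33_permrep_association.py | compute_suborbits_from_generators
-- ===== SOURCE A (Python) =====
-- from collections import Counter, deque
-- from typing import Dict, Iterable, List, Set, Tuple
--
-- def _compose(p: tuple[int, ...], q: tuple[int, ...]) -> tuple[int, ...]:
--     # (p o q)(i) = p[q[i]] ; permutations as 0-indexed image tuples
--     return tuple(p[q[i]] for i in range(len(p)))
--
-- def _inv(p: tuple[int, ...]) -> tuple[int, ...]:
--     out = [0] * len(p)
--     for i, a in enumerate(p):
--         out[a] = i
--     return tuple(out)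
--
-- def _point_bfs_coset_reps(
--     gens: Iterable[tuple[int, ...]], n: int, base: int = 0
-- ) -> Dict[int, tuple[int, ...]]:
--     # return map point -> permutation p with p(base)=point
--     gens = list(gens)
--     idperm = tuple(range(n))
--     rep: Dict[int, tuple[int, ...]] = {base: idperm}
--     q = deque([base])
--     while q:
--         u = q.popleft()
--         p_u = rep[u]
--         for g in gens:
--             v = g[u]
--             if v not in rep:
--                 # rep[v] = g o p_u
--                 rep[v] = _compose(g, p_u)
--                 q.append(v)
--     return rep
--
-- def schreier_stabilizer_from_coset_reps(
--     gens: Iterable[tuple[int, ...]],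
--     coset_reps: Dict[int, tuple[int, ...]],
--     base: int = 0,
-- ) -> List[tuple[int, ...]]:
--     # Schreier generators s = t_u * g * inv(t_{g(u)}) which fix base
--     gens = list(gens)
--     Hgens: Set[tuple[int, ...]] = set()
--     for u, t_u in coset_reps.items():
--         for g in gens:
--             gu = g[u]
--             t_gu = coset_reps[gu]
--             s = _compose(t_u, _compose(g, _inv(t_gu)))
--             # sanity: s[base] should be base
--             if s[base] != base:
--                 # numerical noise or cycle notation mismatch
--                 continue
--             Hgens.add(s)
--     return list(Hgens)
--
-- def orbit_of_group_on_points(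
--     generators: Iterable[tuple[int, ...]], start: int
-- ) -> List[int]:
--     gens = list(generators)
--     seen = {start}
--     q = deque([start])
--     while q:
--         u = q.popleft()
--         for g in gens:
--             v = g[u]
--             if v not in seen:
--                 seen.add(v)
--                 q.append(v)
--     return sorted(seen)
--
-- def compute_suborbits_from_generators(
--     gens: Iterable[tuple[int, ...]], base: int = 0
-- ) -> List[List[int]]:
--     gens = list(gens)
--     n = len(gens[0])
--     # coset reps mapping base->point
--     coset_reps = _point_bfs_coset_reps(gens, n, base)
--     # compute stabilizer generators (Schreier)
--     Hgens = schreier_stabilizer_from_coset_reps(gens, coset_reps, base)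
--     # compute H-orbits on points (these are the suborbits)
--     assigned = [False] * n
--     suborbits: List[List[int]] = []
--     for v in range(n):
--         if assigned[v]:
--             continue
--         orb = orbit_of_group_on_points(Hgens, v)
--         for w in orb:
--             assigned[w] = True
--         suborbits.append(orb)
--     # ensure base is in first orbit (index 0)
--     suborbits_sorted = sorted(suborbits, key=lambda s: (0 not in s, len(s)))
--     return suborbits_sorted
-- ===== SOURCE B (Python) =====
-- from collections import deque
--
--
-- def _compose(p, q):
--     # (p o q)(i) = p[q[i]]
--     return tuple(p[q[i]] for i in range(len(p)))
--
--
-- def _inv(p):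
--     out = [0] * len(p)
--     for i, a in enumerate(p):
--         out[a] = i
--     return tuple(out)
--
--
-- def _point_bfs_coset_reps(gens, n, base=0):
--     gens = list(gens)
--     idperm = tuple(range(n))
--     rep = {base: idperm}
--     q = deque([base])
--     while q:
--         u = q.popleft()
--         p_u = rep[u]
--         for g in gens:
--             v = g[u]
--             if v not in rep:
--                 rep[v] = _compose(g, p_u)
--                 q.append(v)
--     return rep
--
--
-- def _schreier_stabilizer(gens, coset_reps, base=0):
--     gens = list(gens)
--     Hgens = set()
--     for u, t_u in coset_reps.items():
--         for g in gens:
--             gu = g[u]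
--             t_gu = coset_reps[gu]
--             s = _compose(t_u, _compose(g, _inv(t_gu)))
--             if s[base] != base:
--                 continue
--             Hgens.add(s)
--     return list(Hgens)
--
--
-- def _saturate(gens, start):
--     # round-based fixpoint closure (no queue): grow S by whole-set images until stable
--     S = {start}
--     while True:
--         T = S | {g[u] for g in gens for u in S}
--         if T == S:
--             return sorted(S)
--         S = T
--
--
-- def compute_suborbits_from_generators(gens, base=0):
--     gens = list(gens)
--     n = len(gens[0])
--     coset_reps = _point_bfs_coset_reps(gens, n, base)
--     Hgens = _schreier_stabilizer(gens, coset_reps, base)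
--     # group the points: take the first not-yet-marked index, close it under Hgens, mark its orbit
--     assigned = [False] * n
--     suborbits = []
--     while False in assigned:
--         v = assigned.index(False)
--         orb = _saturate(Hgens, v)
--         for w in orb:
--             assigned[w] = True
--         suborbits.append(orb)
--     return sorted(suborbits, key=lambda s: (0 not in s, len(s)))
-- ===== Notes on version B (the rewrite author's own statement) =====
-- stated objective: alternative
-- what changed: The coset-rep BFS and Schreier generator construction are kept, but the final grouping replaces A's for-v-in-range(n) queue-BFS-per-orbit with a while-loop that repeatedly takes the first unmarked index (assigned.index(False)) and closes it by round-based whole-set fixpoint saturation instead of a queue BFS.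
-- outside the precondition, e.g. on compute_suborbits_from_generators([(0, 3)], 0): A raises IndexError, B raises IndexError; on compute_suborbits_from_generators([], 0): A raises IndexError, B raises IndexError
import Mathlib
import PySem

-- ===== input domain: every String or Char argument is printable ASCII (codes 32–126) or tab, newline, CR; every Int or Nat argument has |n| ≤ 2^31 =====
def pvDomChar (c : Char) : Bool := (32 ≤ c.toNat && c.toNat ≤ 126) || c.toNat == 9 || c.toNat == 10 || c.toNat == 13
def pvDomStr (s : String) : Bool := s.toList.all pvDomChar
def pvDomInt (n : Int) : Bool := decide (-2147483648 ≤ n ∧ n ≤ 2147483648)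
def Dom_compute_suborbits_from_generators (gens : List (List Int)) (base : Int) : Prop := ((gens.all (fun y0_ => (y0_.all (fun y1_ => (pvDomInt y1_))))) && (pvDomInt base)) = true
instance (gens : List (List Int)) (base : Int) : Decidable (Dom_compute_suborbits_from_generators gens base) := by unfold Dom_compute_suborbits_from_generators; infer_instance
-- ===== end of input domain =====

-- B keeps A's coset-rep BFS and Schreier-generator construction (shared helpers below) but replaces the
-- final grouping: instead of A's for-v-in-range(n) loop with a queue BFS per orbit, B repeatedly takes the
-- first unmarked index and closes it by round-based whole-set fixpoint saturation.  Objective: alternative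
-- (same cost, different loop structure and closure computation).

-- ===== SHARED HELPERS (A's _compose/_inv/_point_bfs_coset_reps/schreier..., reused verbatim by B) =====

-- g[u] for permutations stored as image lists (index in range under Pre_; default never used there)
def pvStep (g : List Int) (u : Int) : Int := PySem.List.pyGetD g u 0

-- _compose: tuple(p[q[i]] for i in range(len(p)))
def pvCompose (p q : List Int) : List Int :=
  (PySem.List.pyRange 0 (PySem.List.len p) 1).map
    (fun i => PySem.List.pyGetD p (PySem.List.pyGetD q i 0) 0)

-- _inv: out = [0]*len(p); for i, a in enumerate(p): out[a] = i
def pvInv (p : List Int) : List Int :=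
  (PySem.List.enumerate p).foldl (fun out ia => PySem.List.pySetD out ia.2 ia.1)
    (List.replicate p.length 0)

-- inner 'for g in gens' of _point_bfs_coset_reps
def pvBfsInner (gens : List (List Int)) (u : Int) (p_u : List Int)
    (st : PySem.Dict Int (List Int) × List Int) : PySem.Dict Int (List Int) × List Int :=
  gens.foldl (fun st g =>
    let v := pvStep g u
    if st.1.contains v then st else (st.1.insert v (pvCompose g p_u), st.2 ++ [v])) st

-- while q: u = q.popleft(); ...   (fuel-guarded; the fuel is ample: one unit per pop, pops ≤ 1 + #inserts)
def pvBfsLoop (gens : List (List Int)) : Nat → PySem.Dict Int (List Int) → List Int → PySem.Dict Int (List Int)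
  | 0, rep, _ => rep
  | _ + 1, rep, [] => rep
  | f + 1, rep, u :: q =>
      let p_u := rep.getD u []
      let st := pvBfsInner gens u p_u (rep, q)
      pvBfsLoop gens f st.1 st.2

def pvPointBfs (gens : List (List Int)) (n base : Int) : PySem.Dict Int (List Int) :=
  pvBfsLoop gens (gens.flatten.length + 2)
    (PySem.Dict.ofList [(base, PySem.List.pyRange 0 n 1)]) [base]

-- schreier_stabilizer_from_coset_reps: s = t_u o (g o inv(t_{g(u)}))
def pvSchreierCand (rep : PySem.Dict Int (List Int)) (ut : Int × List Int) (g : List Int) : List Int :=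
  pvCompose ut.2 (pvCompose g (pvInv (rep.getD (pvStep g ut.1) [])))

def pvSchreier (gens : List (List Int)) (rep : PySem.Dict Int (List Int)) (base : Int) : List (List Int) :=
  rep.items.foldl (fun H ut =>
    gens.foldl (fun H g =>
      let s := pvSchreierCand rep ut g
      if PySem.List.pyGetD s base 0 ≠ base then H else PySem.Set.add H s) H)
    PySem.Set.empty

-- ===== PORT A =====

-- inner 'for g in gens' of orbit_of_group_on_points
def pvOrbInner (H : List (List Int)) (u : Int) (st : PySem.Set Int × List Int) : PySem.Set Int × List Int :=
  H.foldl (fun st g =>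
    let v := pvStep g u
    if st.1.contains v then st else (PySem.Set.add st.1 v, st.2 ++ [v])) st

-- while q of orbit_of_group_on_points (fuel ample as above)
def pvOrbLoop (H : List (List Int)) : Nat → PySem.Set Int → List Int → PySem.Set Int
  | 0, seen, _ => seen
  | _ + 1, seen, [] => seen
  | f + 1, seen, u :: q =>
      let st := pvOrbInner H u (seen, q)
      pvOrbLoop H f st.1 st.2

def pvOrbit (H : List (List Int)) (start : Int) : List Int :=
  PySem.List.sorted (pvOrbLoop H (H.flatten.length + 3) (PySem.Set.ofList [start]) [start])
    (fun x => x) false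

def compute_suborbits_from_generators (gens : List (List Int)) (base : Int) : List (List Int) :=
  let n := PySem.List.len (PySem.List.pyGetD gens 0 [])
  let rep := pvPointBfs gens n base
  let H := pvSchreier gens rep base
  let st := (PySem.List.pyRange 0 n 1).foldl
    (fun (st : List Bool × List (List Int)) v =>
      if PySem.List.pyGetD st.1 v false then st
      else
        let orb := pvOrbit H v
        (orb.foldl (fun a w => PySem.List.pySetD a w true) st.1, st.2 ++ [orb]))
    (List.replicate n.toNat false, [])
  PySem.List.sorted2 st.2 (fun s => !(s.contains 0)) (fun s => PySem.List.len s) false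

-- ===== PORT B =====

-- T = S | {g[u] for g in gens for u in S}
def pvSatStep (H : List (List Int)) (S : PySem.Set Int) : PySem.Set Int :=
  PySem.Set.union S
    (H.foldl (fun acc g => S.foldl (fun acc u => PySem.Set.add acc (pvStep g u)) acc) PySem.Set.empty)

-- while True: T = ...; if T == S: return S; S = T   (fuel ample: S strictly grows each round)
def pvSatLoop (H : List (List Int)) : Nat → PySem.Set Int → PySem.Set Int
  | 0, S => S
  | f + 1, S =>
      let T := pvSatStep H S
      if PySem.Set.equal T S then S else pvSatLoop H f T

def pvSaturate (H : List (List Int)) (start : Int) : List Int :=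
  PySem.List.sorted (pvSatLoop H (H.flatten.length + 3) (PySem.Set.ofList [start])) (fun x => x) false

-- while False in assigned: v = assigned.index(False); orb = _saturate(Hgens, v); mark orb; append
-- (fuel ample: every round marks assigned[v] = True, so rounds ≤ n)
def pvWhileLoop (H : List (List Int)) : Nat → List Bool → List (List Int) → List (List Int)
  | 0, _, subs => subs
  | f + 1, assigned, subs =>
      if assigned.contains false then
        let v : Int := (((PySem.List.index? assigned false).getD 0 : Nat) : Int)
        let orb := pvSaturate H v
        pvWhileLoop H f (orb.foldl (fun a w => PySem.List.pySetD a w true) assigned) (subs ++ [orb])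
      else subs

def compute_suborbits_from_generators_alt (gens : List (List Int)) (base : Int) : List (List Int) :=
  let n := PySem.List.len (PySem.List.pyGetD gens 0 [])
  let rep := pvPointBfs gens n base
  let H := pvSchreier gens rep base
  let subs := pvWhileLoop H (n.toNat + 1) (List.replicate n.toNat false) []
  PySem.List.sorted2 subs (fun s => !(s.contains 0)) (fun s => PySem.List.len s) false

-- ===== PRECONDITION & SPEC =====

-- Pre_ is A's domain of definition: a nonempty list of equal-length rows whose entries (image points)
-- and base are valid Python indices into a row, i.e. lie in [-n, n) where n = len(gens[0]).  Outside it
-- A raises IndexError (empty gens, a row of another length, an entry or base of magnitude > n), except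
-- on rare inputs whose out-of-range entries are never indexed, where A happens to return and B returns
-- the same value (see the cite).
def Pre_compute_suborbits_from_generators (gens : List (List Int)) (base : Int) : Prop :=
  gens ≠ [] ∧
  (∀ g ∈ gens, g.length = (gens.headD []).length ∧
    ∀ x ∈ g, -((gens.headD []).length : Int) ≤ x ∧ x < ((gens.headD []).length : Int)) ∧
  -((gens.headD []).length : Int) ≤ base ∧ base < ((gens.headD []).length : Int)

instance (gens : List (List Int)) (base : Int) : Decidable (Pre_compute_suborbits_from_generators gens base) := by
  unfold Pre_compute_suborbits_from_generators; infer_instance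

def pvWitness_compute_suborbits_from_generators : List (List Int) × Int :=
  ([[1, 0, 2], [0, 2, 1]], 0)

def Spec_compute_suborbits_from_generators (gens : List (List Int)) (base : Int) (out : List (List Int)) : Prop := out = compute_suborbits_from_generators_alt gens base
instance (gens : List (List Int)) (base : Int) (out : List (List Int)) : Decidable (Spec_compute_suborbits_from_generators gens base out) := by unfold Spec_compute_suborbits_from_generators; infer_instance

-- ===== CLAIM (what is proved, stated in full; the proofs are below) =====
def Claim_equal_compute_suborbits_from_generators : Prop := ∀ (gens : List (List Int)) (base : Int), Dom_compute_suborbits_from_generators gens base → Pre_compute_suborbits_from_generators gens base → Spec_compute_suborbits_from_generators gens base (compute_suborbits_from_generators gens base)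

-- ===== LEMMAS AND PROOFS =====

inductive pvReach (H : List (List Int)) (s : Int) : Int → Prop
  | refl : pvReach H s s
  | step {u : Int} (g : List Int) : g ∈ H → pvReach H s u → pvReach H s (pvStep g u)

theorem pvStep_mem (g : List Int) (u : Int) : pvStep g u = 0 ∨ pvStep g u ∈ g := by
  unfold pvStep
  by_cases h : PySem.Raise.InRange g.length u
  · exact Or.inr (PySem.List.pyGetD_mem g 0 h)
  · exact Or.inl (PySem.List.pyGetD_of_none g u 0 ((PySem.List.pyGet?_eq_none_iff g u).mpr h))

theorem pvCompose_mem (p q : List Int) (x : Int) (hx : x ∈ pvCompose p q) : x = 0 ∨ x ∈ p := by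
  unfold pvCompose at hx
  obtain ⟨i, _, rfl⟩ := List.mem_map.mp hx
  exact pvStep_mem p _

-- universe of values the closures can visit
def pvU (H : List (List Int)) (s : Int) : List Int := PySem.Set.ofList (s :: 0 :: H.flatten)

theorem pvStep_mem_U {H : List (List Int)} {g : List Int} (hg : g ∈ H) (u s : Int) :
    pvStep g u ∈ pvU H s := by
  rcases pvStep_mem g u with h | h
  · rw [h]; exact (PySem.Set.mem_ofList _ _).mpr (by simp)
  · exact (PySem.Set.mem_ofList _ _).mpr (by
      simp only [List.mem_cons]
      exact Or.inr (Or.inr (List.mem_flatten.mpr ⟨g, hg, h⟩)))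

theorem pvU_length_le (H : List (List Int)) (s : Int) :
    (pvU H s).length ≤ H.flatten.length + 2 := by
  have := PySem.Set.length_ofList_le (s :: 0 :: H.flatten)
  simpa [pvU] using this

theorem pvOrbInner_spec (H : List (List Int)) (u : Int) :
    ∀ (seen q : List Int), seen.Nodup →
    ∃ news : List Int,
      pvOrbInner H u (seen, q) = (seen ++ news, q ++ news) ∧
      (seen ++ news).Nodup ∧
      (∀ x ∈ news, ∃ g ∈ H, x = pvStep g u) ∧
      (∀ g ∈ H, pvStep g u ∈ seen ++ news) := by
  induction H with
  | nil => intro seen q hnd; exact ⟨[], by simp [pvOrbInner], by simpa using hnd, by simp, by simp⟩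
  | cons g H ih =>
    intro seen q hnd
    by_cases hc : pvStep g u ∈ seen
    · have hstep : pvOrbInner (g :: H) u (seen, q) = pvOrbInner H u (seen, q) := by
        simp [pvOrbInner, List.foldl_cons, hc]
      obtain ⟨news, h1, h2, h3, h4⟩ := ih seen q hnd
      refine ⟨news, by rw [hstep, h1], h2, ?_, ?_⟩
      · intro x hx
        obtain ⟨g', hg', he⟩ := h3 x hx
        exact ⟨g', List.mem_cons_of_mem _ hg', he⟩
      · intro g' hg'
        rcases List.mem_cons.mp hg' with rfl | hg'
        · exact List.mem_append_left _ hc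
        · exact h4 g' hg'
    · have hcb : PySem.Set.contains seen (pvStep g u) = false := by
        rw [Bool.eq_false_iff]; intro h; exact hc ((PySem.Set.contains_iff _ _).mp h)
      have hstep : pvOrbInner (g :: H) u (seen, q) =
          pvOrbInner H u (seen ++ [pvStep g u], q ++ [pvStep g u]) := by
        simp [pvOrbInner, List.foldl_cons, hc]
      have hnd' : (seen ++ [pvStep g u]).Nodup := by
        refine hnd.append (List.nodup_singleton _) ?_
        intro a ha hb
        simp only [List.mem_singleton] at hb
        subst hb
        exact hc ha
      obtain ⟨news, h1, h2, h3, h4⟩ := ih (seen ++ [pvStep g u]) (q ++ [pvStep g u]) hnd'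
      refine ⟨pvStep g u :: news, ?_, by simpa using h2, ?_, ?_⟩
      · rw [hstep, h1]; simp
      · intro x hx
        rcases List.mem_cons.mp hx with rfl | hx
        · exact ⟨g, List.mem_cons_self, rfl⟩
        · obtain ⟨g', hg', he⟩ := h3 x hx
          exact ⟨g', List.mem_cons_of_mem _ hg', he⟩
      · intro g' hg'
        rcases List.mem_cons.mp hg' with rfl | hg'
        · simp
        · have := h4 g' hg'
          simpa using this

theorem pvOrbLoop_nodup (H : List (List Int)) :
    ∀ (f : Nat) (seen q : List Int), seen.Nodup → (pvOrbLoop H f seen q).Nodup := by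
  intro f
  induction f with
  | zero => intro seen q hnd; simpa [pvOrbLoop] using hnd
  | succ f ih =>
    intro seen q hnd
    cases q with
    | nil => simpa [pvOrbLoop] using hnd
    | cons u q =>
      obtain ⟨news, h1, h2, _, _⟩ := pvOrbInner_spec H u seen q hnd
      rw [pvOrbLoop, h1]
      exact ih _ _ h2

theorem pvOrbLoop_sound (H : List (List Int)) (s : Int) :
    ∀ (f : Nat) (seen q : List Int), seen.Nodup → (∀ x ∈ seen, pvReach H s x) →
      (∀ x ∈ q, x ∈ seen) → ∀ x ∈ pvOrbLoop H f seen q, pvReach H s x := by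
  intro f
  induction f with
  | zero => intro seen q _ hr _ x hx; exact hr x (by simpa [pvOrbLoop] using hx)
  | succ f ih =>
    intro seen q hnd hr hq
    cases q with
    | nil => intro x hx; exact hr x (by simpa [pvOrbLoop] using hx)
    | cons u q =>
      obtain ⟨news, h1, h2, h3, _⟩ := pvOrbInner_spec H u seen q hnd
      rw [pvOrbLoop, h1]
      refine ih _ _ h2 ?_ ?_
      · intro x hx
        rcases List.mem_append.mp hx with hx | hx
        · exact hr x hx
        · obtain ⟨g, hg, rfl⟩ := h3 x hx
          exact pvReach.step g hg (hr u (hq u List.mem_cons_self))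
      · intro x hx
        rcases List.mem_append.mp hx with hx | hx
        · exact List.mem_append_left _ (hq x (List.mem_cons_of_mem _ hx))
        · exact List.mem_append_right _ hx

theorem pvOrbLoop_closed (H : List (List Int)) (s : Int) :
    ∀ (f : Nat) (seen q : List Int), seen.Nodup → (∀ x ∈ seen, x ∈ pvU H s) →
      (∀ x ∈ q, x ∈ seen) →
      (∀ x ∈ seen, x ∉ q → ∀ g ∈ H, pvStep g x ∈ seen) →
      ((pvU H s).length + q.length < seen.length + f) →
      (∀ x ∈ seen, x ∈ pvOrbLoop H f seen q) ∧
      (∀ x ∈ pvOrbLoop H f seen q, ∀ g ∈ H, pvStep g x ∈ pvOrbLoop H f seen q) := by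
  intro f
  induction f with
  | zero =>
    intro seen q hnd hU _ _ hf
    exfalso
    have : seen.length ≤ (pvU H s).length := (hnd.subperm hU).length_le
    omega
  | succ f ih =>
    intro seen q hnd hU hq hcl hf
    cases q with
    | nil =>
      constructor
      · intro x hx; simpa [pvOrbLoop] using hx
      · intro x hx g hg
        simp only [pvOrbLoop] at hx ⊢
        exact hcl x hx (by simp) g hg
    | cons u q =>
      obtain ⟨news, h1, h2, h3, h4⟩ := pvOrbInner_spec H u seen q hnd
      rw [pvOrbLoop, h1]
      have hU' : ∀ x ∈ seen ++ news, x ∈ pvU H s := by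
        intro x hx
        rcases List.mem_append.mp hx with hx | hx
        · exact hU x hx
        · obtain ⟨g, hg, rfl⟩ := h3 x hx
          exact pvStep_mem_U hg u s
      have hq' : ∀ x ∈ q ++ news, x ∈ seen ++ news := by
        intro x hx
        rcases List.mem_append.mp hx with hx | hx
        · exact List.mem_append_left _ (hq x (List.mem_cons_of_mem _ hx))
        · exact List.mem_append_right _ hx
      have hcl' : ∀ x ∈ seen ++ news, x ∉ q ++ news → ∀ g ∈ H, pvStep g x ∈ seen ++ news := by
        intro x hx hxq g hg
        rcases List.mem_append.mp hx with hx | hx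
        · by_cases hxu : x = u
          · subst hxu; exact h4 g hg
          · have : x ∉ q := fun h => hxq (List.mem_append_left _ h)
            have hx' : x ∉ u :: q := by
              intro h; rcases List.mem_cons.mp h with h | h
              · exact hxu h
              · exact this h
            exact List.mem_append_left _ (hcl x hx hx' g hg)
        · exact absurd (List.mem_append_right q hx) hxq
      have hf' : (pvU H s).length + (q ++ news).length < (seen ++ news).length + f := by
        simp only [List.length_append, List.length_cons] at *
        omega
      have hmain := ih (seen ++ news) (q ++ news) h2 hU' hq' hcl' hf'
      refine ⟨?_, hmain.2⟩
      intro x hx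
      exact hmain.1 x (List.mem_append_left _ hx)

-- final BFS characterization
theorem pvOrbLoopFinal_spec (H : List (List Int)) (s : Int) :
    (∀ x, x ∈ pvOrbLoop H (H.flatten.length + 3) (PySem.Set.ofList [s]) [s] ↔ pvReach H s x) ∧
    (pvOrbLoop H (H.flatten.length + 3) (PySem.Set.ofList [s]) [s]).Nodup := by
  have hofl : PySem.Set.ofList [s] = [s] := PySem.Set.ofList_eq_self_of_nodup _ (List.nodup_singleton s)
  rw [hofl]
  have hnd : ([s] : List Int).Nodup := List.nodup_singleton s
  have hsU : ∀ x ∈ ([s] : List Int), x ∈ pvU H s := by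
    intro x hx
    simp only [List.mem_singleton] at hx
    subst hx
    exact (PySem.Set.mem_ofList _ _).mpr (by simp)
  have hf : (pvU H s).length + ([s] : List Int).length < ([s] : List Int).length + (H.flatten.length + 3) := by
    have := pvU_length_le H s
    simp only [List.length_singleton]
    omega
  have hcl : ∀ x ∈ ([s] : List Int), x ∉ ([s] : List Int) → ∀ g ∈ H, pvStep g x ∈ ([s] : List Int) := by
    intro x hx hx'; exact absurd hx hx'
  have hmain := pvOrbLoop_closed H s (H.flatten.length + 3) [s] [s] hnd hsU (fun x hx => hx) hcl hf
  constructor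
  · intro x
    constructor
    · intro hx
      exact pvOrbLoop_sound H s _ [s] [s] hnd
        (by intro y hy; simp only [List.mem_singleton] at hy; subst hy; exact pvReach.refl)
        (fun y hy => hy) x hx
    · intro hr
      induction hr with
      | refl => exact hmain.1 s List.mem_cons_self
      | step g hg _ ih2 => exact hmain.2 _ ih2 g hg
  · exact pvOrbLoop_nodup H _ [s] [s] hnd

theorem pvSatStep_mem (H : List (List Int)) (S : PySem.Set Int) (x : Int) :
    x ∈ pvSatStep H S ↔ x ∈ S ∨ ∃ g ∈ H, ∃ u ∈ S, x = pvStep g u := by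
  have hfold : ∀ (Hl : List (List Int)) (acc : PySem.Set Int),
      x ∈ Hl.foldl (fun acc g => S.foldl (fun acc u => PySem.Set.add acc (pvStep g u)) acc) acc ↔
      x ∈ acc ∨ ∃ g ∈ Hl, ∃ u ∈ S, x = pvStep g u := by
    intro Hl
    induction Hl with
    | nil => intro acc; simp
    | cons g Hl ih =>
      intro acc
      rw [List.foldl_cons, ih]
      rw [PySem.Set.mem_foldl_add]
      constructor
      · rintro (⟨hx | ⟨u, hu, rfl⟩⟩ | ⟨g', hg', u, hu, rfl⟩)
        · exact Or.inl hx
        · exact Or.inr ⟨g, List.mem_cons_self, u, hu, rfl⟩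
        · exact Or.inr ⟨g', List.mem_cons_of_mem _ hg', u, hu, rfl⟩
      · rintro (hx | ⟨g', hg', u, hu, rfl⟩)
        · exact Or.inl (Or.inl hx)
        · rcases List.mem_cons.mp hg' with rfl | hg'
          · exact Or.inl (Or.inr ⟨u, hu, rfl⟩)
          · exact Or.inr ⟨g', hg', u, hu, rfl⟩
  unfold pvSatStep
  rw [PySem.Set.mem_union, hfold]
  simp [PySem.Set.empty]

theorem pvSatStep_nodup (H : List (List Int)) (S : PySem.Set Int) (h : S.Nodup) :
    (pvSatStep H S).Nodup := PySem.Set.nodup_union _ _ h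

theorem pvSatStep_supset (H : List (List Int)) (S : PySem.Set Int) (x : Int) (hx : x ∈ S) :
    x ∈ pvSatStep H S := (pvSatStep_mem H S x).mpr (Or.inl hx)

theorem pvSatLoop_sound (H : List (List Int)) (s : Int) :
    ∀ (f : Nat) (S : PySem.Set Int), (∀ x ∈ S, pvReach H s x) →
      ∀ x ∈ pvSatLoop H f S, pvReach H s x := by
  intro f
  induction f with
  | zero => intro S hr x hx; exact hr x (by simpa [pvSatLoop] using hx)
  | succ f ih =>
    intro S hr
    rw [pvSatLoop]
    split
    · exact hr
    · refine ih _ ?_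
      intro x hx
      rcases (pvSatStep_mem H S x).mp hx with hx | ⟨g, hg, u, hu, rfl⟩
      · exact hr x hx
      · exact pvReach.step g hg (hr u hu)

theorem pvSatLoop_nodup (H : List (List Int)) :
    ∀ (f : Nat) (S : PySem.Set Int), S.Nodup → (pvSatLoop H f S).Nodup := by
  intro f
  induction f with
  | zero => intro S h; simpa [pvSatLoop] using h
  | succ f ih =>
    intro S h
    rw [pvSatLoop]
    split
    · exact h
    · exact ih _ (pvSatStep_nodup H S h)

theorem pvSatLoop_closed (H : List (List Int)) (s : Int) :
    ∀ (f : Nat) (S : PySem.Set Int), S.Nodup → (∀ x ∈ S, x ∈ pvU H s) →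
      ((pvU H s).length < S.length + f) →
      (∀ x ∈ S, x ∈ pvSatLoop H f S) ∧
      (∀ x ∈ pvSatLoop H f S, ∀ g ∈ H, pvStep g x ∈ pvSatLoop H f S) := by
  intro f
  induction f with
  | zero =>
    intro S hnd hU hf
    exfalso
    have : S.length ≤ (pvU H s).length := (hnd.subperm hU).length_le
    omega
  | succ f ih =>
    intro S hnd hU hf
    rw [pvSatLoop]
    split
    · next heq =>
      have hiff := (PySem.Set.equal_iff _ _).mp heq
      constructor
      · exact fun x hx => hx
      · intro x hx g hg
        exact (hiff _).mp ((pvSatStep_mem H S _).mpr (Or.inr ⟨g, hg, x, hx, rfl⟩))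
    · next hne =>
      have hsub : ∀ x ∈ S, x ∈ pvSatStep H S := pvSatStep_supset H S
      have hW : ∃ w, w ∈ pvSatStep H S ∧ w ∉ S := by
        by_contra hw
        refine hne ((PySem.Set.equal_iff _ _).mpr (fun x => ⟨fun h => ?_, fun h => hsub x h⟩))
        by_contra hxS
        exact hw ⟨x, h, hxS⟩
      obtain ⟨w, hwT, hwS⟩ := hW
      have hndT : (pvSatStep H S).Nodup := pvSatStep_nodup H S hnd
      have hUT : ∀ x ∈ pvSatStep H S, x ∈ pvU H s := by
        intro x hx
        rcases (pvSatStep_mem H S x).mp hx with hx | ⟨g, hg, u, _, rfl⟩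
        · exact hU x hx
        · exact pvStep_mem_U hg u s
      have hlen : S.length + 1 ≤ (pvSatStep H S).length := by
        have hnd' : (w :: S).Nodup := List.nodup_cons.mpr ⟨hwS, hnd⟩
        have hsub' : (w :: S) ⊆ pvSatStep H S := by
          intro a ha
          rcases List.mem_cons.mp ha with rfl | ha
          · exact hwT
          · exact hsub a ha
        have := (hnd'.subperm hsub').length_le
        simpa using this
      have hmain := ih (pvSatStep H S) hndT hUT (by omega)
      exact ⟨fun x hx => hmain.1 x (hsub x hx), hmain.2⟩

theorem pvSatLoopFinal_spec (H : List (List Int)) (s : Int) :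
    (∀ x, x ∈ pvSatLoop H (H.flatten.length + 3) (PySem.Set.ofList [s]) ↔ pvReach H s x) ∧
    (pvSatLoop H (H.flatten.length + 3) (PySem.Set.ofList [s])).Nodup := by
  have hofl : PySem.Set.ofList [s] = [s] := PySem.Set.ofList_eq_self_of_nodup _ (List.nodup_singleton s)
  rw [hofl]
  have hnd : ([s] : List Int).Nodup := List.nodup_singleton s
  have hsU : ∀ x ∈ ([s] : List Int), x ∈ pvU H s := by
    intro x hx
    simp only [List.mem_singleton] at hx
    subst hx
    exact (PySem.Set.mem_ofList _ _).mpr (by simp)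
  have hf : (pvU H s).length < ([s] : List Int).length + (H.flatten.length + 3) := by
    have := pvU_length_le H s
    simp only [List.length_singleton]
    omega
  have hmain := pvSatLoop_closed H s (H.flatten.length + 3) [s] hnd hsU hf
  constructor
  · intro x
    constructor
    · exact fun hx => pvSatLoop_sound H s _ [s]
        (by intro y hy; simp only [List.mem_singleton] at hy; subst hy; exact pvReach.refl) x hx
    · intro hr
      induction hr with
      | refl => exact hmain.1 s List.mem_cons_self
      | step g hg _ ih2 => exact hmain.2 _ ih2 g hg
  · exact pvSatLoop_nodup H _ [s] hnd

theorem pvOrbit_eq_pvSaturate (H : List (List Int)) (s : Int) :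
    pvOrbit H s = pvSaturate H s := by
  unfold pvOrbit pvSaturate
  apply PySem.List.sorted_eq_sorted_of_perm _ _ _ (fun a b h => h)
  obtain ⟨hmo, hno⟩ := pvOrbLoopFinal_spec H s
  obtain ⟨hms, hns⟩ := pvSatLoopFinal_spec H s
  exact (List.perm_ext_iff_of_nodup hno hns).mpr (fun a => (hmo a).trans (hms a).symm)

theorem pvOrbit_mem_iff (H : List (List Int)) (s x : Int) :
    x ∈ pvOrbit H s ↔ pvReach H s x := by
  unfold pvOrbit
  rw [PySem.List.mem_sorted]
  exact (pvOrbLoopFinal_spec H s).1 x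

theorem pvOrbit_self_mem (H : List (List Int)) (s : Int) : s ∈ pvOrbit H s :=
  (pvOrbit_mem_iff H s s).mpr pvReach.refl

theorem pvReach_bounds {H : List (List Int)} {n : Int}
    (HE : ∀ g ∈ H, ∀ x ∈ g, -n ≤ x ∧ x < n) (hn : 0 < n) {s x : Int}
    (hs : -n ≤ s ∧ s < n) (hr : pvReach H s x) : -n ≤ x ∧ x < n := by
  induction hr with
  | refl => exact hs
  | step g hg _ _ =>
    rcases pvStep_mem g _ with h | h
    · rw [h]; constructor <;> omega
    · exact HE g hg _ h

-- Python's wraparound index: the point named by an image value x ∈ [-n, n)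
def pvWrap (n x : Int) : Int := if 0 ≤ x then x else x + n

theorem pvWrap_bounds {n x : Int} (h1 : -n ≤ x) (h2 : x < n) :
    0 ≤ pvWrap n x ∧ pvWrap n x < n := by
  unfold pvWrap
  split_ifs <;> omega

theorem pvWrap_of_nonneg {n x : Int} (h : 0 ≤ x) : pvWrap n x = x := if_pos h

theorem pvSetD_wrap {α : Type} (a : List α) (x : Int) (v : α)
    (h1 : -(a.length : Int) ≤ x) (_h2 : x < (a.length : Int)) :
    PySem.List.pySetD a x v = a.set (pvWrap (a.length : Int) x).toNat v := by
  by_cases h : 0 ≤ x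
  · rw [pvWrap_of_nonneg h]
    exact PySem.List.pySetD_of_nonneg a v h
  · have hwrap : pvWrap (a.length : Int) x = x + a.length := if_neg h
    rw [hwrap]
    simp only [PySem.List.pySetD, PySem.List.pySet?, PySem.List.pyIdx?]
    rw [if_neg h, if_pos h1]
    simp only [Option.map_some, Option.getD_some]
    congr 1
    omega

theorem pvBfsInner_values (gens : List (List Int)) (u : Int) (p : List Int) :
    ∀ (st : PySem.Dict Int (List Int) × List Int) (w : List Int),
      w ∈ (pvBfsInner gens u p st).1.values →
      w ∈ st.1.values ∨ ∃ g ∈ gens, w = pvCompose g p := by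
  induction gens with
  | nil => intro st w hw; exact Or.inl (by simpa [pvBfsInner] using hw)
  | cons g gens ih =>
    intro st w hw
    have hstep : pvBfsInner (g :: gens) u p st =
        pvBfsInner gens u p (if st.1.contains (pvStep g u) then st
          else (st.1.insert (pvStep g u) (pvCompose g p), st.2 ++ [pvStep g u])) := by
      simp [pvBfsInner, List.foldl_cons]
    rw [hstep] at hw
    rcases ih _ w hw with hv | ⟨g', hg', he⟩
    · by_cases hc : st.1.contains (pvStep g u)
      · rw [if_pos hc] at hv
        exact Or.inl hv
      · rw [if_neg hc] at hv
        rcases PySem.Dict.mem_values_insert _ _ _ _ hv with he | hv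
        · exact Or.inr ⟨g, List.mem_cons_self, he⟩
        · exact Or.inl hv
    · exact Or.inr ⟨g', List.mem_cons_of_mem _ hg', he⟩

theorem pvBfsLoop_values (gens : List (List Int)) (P : List Int → Prop)
    (hcomp : ∀ g ∈ gens, ∀ pu, P (pvCompose g pu)) :
    ∀ (f : Nat) (rep : PySem.Dict Int (List Int)) (q : List Int),
      (∀ p ∈ rep.values, P p) → ∀ p ∈ (pvBfsLoop gens f rep q).values, P p := by
  intro f
  induction f with
  | zero => intro rep q h; simpa [pvBfsLoop] using h
  | succ f ih =>
    intro rep q h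
    cases q with
    | nil => simpa [pvBfsLoop] using h
    | cons u q =>
      rw [pvBfsLoop]
      refine ih _ _ ?_
      intro p hp
      rcases pvBfsInner_values gens u (rep.getD u []) (rep, q) p hp with hp | ⟨g, hg, rfl⟩
      · exact h p hp
      · exact hcomp g hg _

theorem pvFoldAbs_mem {β : Type} (F : PySem.Set (List Int) → β → PySem.Set (List Int))
    (Q : β → List Int → Prop)
    (hF : ∀ (acc : PySem.Set (List Int)) (b : β) (x : List Int), x ∈ F acc b → x ∈ acc ∨ Q b x) :
    ∀ (l : List β) (acc : PySem.Set (List Int)) (x : List Int),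
      x ∈ l.foldl F acc → x ∈ acc ∨ ∃ b ∈ l, Q b x := by
  intro l
  induction l with
  | nil => intro acc x h; exact Or.inl (by simpa using h)
  | cons b l ih =>
    intro acc x h
    rw [List.foldl_cons] at h
    rcases ih (F acc b) x h with h' | ⟨b', hb', hq⟩
    · rcases hF acc b x h' with h'' | hq
      · exact Or.inl h''
      · exact Or.inr ⟨b, List.mem_cons_self, hq⟩
    · exact Or.inr ⟨b', List.mem_cons_of_mem _ hb', hq⟩

theorem pvSchreier_mem (gens : List (List Int)) (rep : PySem.Dict Int (List Int)) (base : Int)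
    (x : List Int) (hx : x ∈ pvSchreier gens rep base) :
    ∃ t ∈ rep.values, ∃ y, x = pvCompose t y := by
  unfold pvSchreier at hx
  have houter := pvFoldAbs_mem
    (fun H ut => gens.foldl (fun H g =>
      let s := pvSchreierCand rep ut g
      if PySem.List.pyGetD s base 0 ≠ base then H else PySem.Set.add H s) H)
    (fun ut x => ∃ y, x = pvCompose ut.2 y)
    (by
      intro acc ut x hx
      have hinner := pvFoldAbs_mem
        (fun H g =>
          let s := pvSchreierCand rep ut g
          if PySem.List.pyGetD s base 0 ≠ base then H else PySem.Set.add H s)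
        (fun g x => ∃ y, x = pvCompose ut.2 y)
        (by
          intro acc' g x' hx'
          dsimp only at hx'
          split at hx'
          · exact Or.inl hx'
          · rcases (PySem.Set.mem_add _ _ _).mp hx' with h | h
            · exact Or.inl h
            · exact Or.inr ⟨_, h⟩)
        gens acc x hx
      rcases hinner with h | ⟨g, _, hq⟩
      · exact Or.inl h
      · exact Or.inr hq)
    rep.items PySem.Set.empty x hx
  rcases houter with h | ⟨ut, hut, y, hy⟩
  · simp [PySem.Set.empty] at h
  · exact ⟨ut.2, List.mem_map_of_mem hut, y, hy⟩

theorem pvMark_length : ∀ (orb : List Int) (a : List Bool),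
    (orb.foldl (fun a w => PySem.List.pySetD a w true) a).length = a.length := by
  intro orb
  induction orb with
  | nil => intro a; simp
  | cons x orb ih =>
    intro a
    rw [List.foldl_cons, ih, PySem.List.length_pySetD]

theorem pvMark_getD : ∀ (orb : List Int) (a : List Bool) (w : Nat),
    (∀ x ∈ orb, -(a.length : Int) ≤ x ∧ x < (a.length : Int)) → w < a.length →
    ((orb.foldl (fun a w => PySem.List.pySetD a w true) a).getD w false = true ↔
      a.getD w false = true ∨ ∃ x ∈ orb, pvWrap (a.length : Int) x = (w : Int)) := by
  intro orb
  induction orb with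
  | nil => intro a w _ _; simp
  | cons x orb ih =>
    intro a w hb hw
    rw [List.foldl_cons]
    have hx := hb x List.mem_cons_self
    have hwb := pvWrap_bounds hx.1 hx.2
    have hset : PySem.List.pySetD a x true = a.set (pvWrap (a.length : Int) x).toNat true :=
      pvSetD_wrap a x true hx.1 hx.2
    rw [hset]
    have hb' : ∀ y ∈ orb, -((a.set (pvWrap (a.length : Int) x).toNat true).length : Int) ≤ y ∧
        y < ((a.set (pvWrap (a.length : Int) x).toNat true).length : Int) := by
      intro y hy
      simpa using hb y (List.mem_cons_of_mem _ hy)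
    have ih' := ih (a.set (pvWrap (a.length : Int) x).toNat true) w hb' (by simpa using hw)
    rw [ih']
    have hlen : (a.set (pvWrap (a.length : Int) x).toNat true).length = a.length := by simp
    rw [hlen]
    have hgetset : (a.set (pvWrap (a.length : Int) x).toNat true).getD w false =
        if (pvWrap (a.length : Int) x).toNat = w then true else a.getD w false := by
      simp only [List.getD_eq_getElem?_getD, List.getElem?_set]
      split
      · next h => simp [h, hw]
      · rfl
    rw [hgetset]
    by_cases hxw : (pvWrap (a.length : Int) x).toNat = w
    · have hxw' : pvWrap (a.length : Int) x = (w : Int) := by omega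
      simp only [if_pos hxw, List.mem_cons]
      constructor
      · intro _; exact Or.inr ⟨x, Or.inl rfl, hxw'⟩
      · intro _; exact Or.inl trivial
    · have hxw' : ¬ (pvWrap (a.length : Int) x = (w : Int)) := by omega
      simp only [if_neg hxw, List.mem_cons]
      constructor
      · rintro (h | ⟨y, hy, hwy⟩)
        · exact Or.inl h
        · exact Or.inr ⟨y, Or.inr hy, hwy⟩
      · rintro (h | ⟨y, hy | hy, hwy⟩)
        · exact Or.inl h
        · exact absurd (hy ▸ hwy) hxw'
        · exact Or.inr ⟨y, hy, hwy⟩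

-- 'False in assigned' is false once every position holds True
theorem pvContains_false (a : List Bool) (h : ∀ w : Nat, w < a.length → a.getD w false = true) :
    a.contains false = false := by
  rw [Bool.eq_false_iff]
  intro hc
  have hmem : false ∈ a := by simpa using hc
  obtain ⟨i, hi, hgi⟩ := List.mem_iff_getElem.mp hmem
  have := h i hi
  rw [List.getD_eq_getElem?_getD, List.getElem?_eq_getElem hi, hgi] at this
  simp at this

-- 'assigned.index(False)' is the first position holding False
theorem pvIndex_false (a : List Bool) (v : Nat) (hv : v < a.length)
    (hfirst : ∀ w : Nat, w < v → a.getD w false = true) (hval : a.getD v false = false) :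
    PySem.List.index? a false = some v := by
  rw [PySem.List.index?_eq_some_iff]
  have hav : a[v] = false := by
    rw [List.getD_eq_getElem?_getD, List.getElem?_eq_getElem hv] at hval
    simpa using hval
  refine ⟨a.take v, a.drop (v + 1), ?_, by simp [hv.le], ?_⟩
  · calc a = a.take v ++ a.drop v := (List.take_append_drop v a).symm
      _ = a.take v ++ (false :: a.drop (v + 1)) := by
          rw [List.drop_eq_getElem_cons hv, hav]
  · intro hmem
    obtain ⟨i, hi, hgi⟩ := List.mem_iff_getElem.mp hmem
    have hiv : i < v := by
      have := List.length_take_le v a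
      omega
    have hia : i < a.length := lt_of_lt_of_le hiv hv.le
    have h1 := hfirst i hiv
    rw [List.getD_eq_getElem?_getD, List.getElem?_eq_getElem hia] at h1
    rw [List.getElem_take] at hgi
    rw [hgi] at h1
    simp at h1

theorem pvGrp (H : List (List Int)) (nN : Nat)
    (HE : ∀ g ∈ H, ∀ x ∈ g, -(nN : Int) ≤ x ∧ x < (nN : Int)) :
    ∀ (k v : Nat) (assigned : List Bool) (subs : List (List Int)) (f : Nat),
      nN - v = k →
      assigned.length = nN →
      (∀ w : Nat, w < v → assigned.getD w false = true) →
      k < f →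
      ((PySem.List.pyRange (v : Int) (nN : Int) 1).foldl
        (fun (st : List Bool × List (List Int)) x =>
          if PySem.List.pyGetD st.1 x false then st
          else
            let orb := pvOrbit H x
            (orb.foldl (fun a w => PySem.List.pySetD a w true) st.1, st.2 ++ [orb]))
        (assigned, subs)).2
      = pvWhileLoop H f assigned subs := by
  intro k
  induction k with
  | zero =>
    intro v assigned subs f hk hlen hfirst hf
    have hvn : (nN : Int) ≤ (v : Int) := by omega
    rw [PySem.List.pyRange_one_eq_nil hvn]
    have hcf : assigned.contains false = false := by
      refine pvContains_false assigned ?_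
      intro w hw
      exact hfirst w (by omega)
    cases f with
    | zero => omega
    | succ f =>
      rw [pvWhileLoop, hcf]
      simp
  | succ k ih =>
    intro v assigned subs f hk hlen hfirst hf
    have hvn : (v : Int) < (nN : Int) := by omega
    have hnn : (0 : Int) < (nN : Int) := by omega
    rw [PySem.List.pyRange_one_cons hvn, List.foldl_cons]
    have hget : PySem.List.pyGetD assigned (v : Int) false = assigned.getD v false :=
      PySem.List.pyGetD_natCast assigned v false
    by_cases ha : assigned.getD v false = true
    · -- position v already marked: A skips, B's loop state is unchanged
      rw [if_pos (by rw [hget]; exact ha)]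
      have hcast : ((v : Int) + 1) = ((v + 1 : Nat) : Int) := by push_cast; ring
      rw [hcast]
      refine ih (v + 1) assigned subs f (by omega) hlen ?_ (by omega)
      intro w hw
      rcases Nat.lt_succ_iff_lt_or_eq.mp hw with hw | rfl
      · exact hfirst w hw
      · exact ha
    · -- position v unmarked: A processes it; B finds it as the first False
      rw [if_neg (by rw [hget]; exact ha)]
      have hvf : assigned.getD v false = false := by
        cases hb : assigned.getD v false
        · rfl
        · exact absurd hb ha
      have hvlen : v < assigned.length := by omega
      have hmemf : false ∈ assigned := by
        obtain ⟨hgi⟩ : ∃ _ : assigned[v] = false, True := by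
          refine ⟨?_, trivial⟩
          rw [List.getD_eq_getElem?_getD, List.getElem?_eq_getElem hvlen] at hvf
          simpa using hvf
        exact List.mem_iff_getElem.mpr ⟨v, hvlen, hgi⟩
      have hcf : assigned.contains false = true := by simpa using hmemf
      have hidx : PySem.List.index? assigned false = some v :=
        pvIndex_false assigned v hvlen hfirst hvf
      cases f with
      | zero => omega
      | succ f =>
        rw [pvWhileLoop]
        rw [hcf, if_pos rfl, hidx]
        simp only [Option.getD_some]
        rw [← pvOrbit_eq_pvSaturate]
        set orb := pvOrbit H (v : Int) with horb
        have horbB : ∀ x ∈ orb, -(nN : Int) ≤ x ∧ x < (nN : Int) := by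
          intro x hx
          exact pvReach_bounds HE hnn ⟨by omega, hvn⟩ ((pvOrbit_mem_iff H _ x).mp hx)
        have hvorb : (v : Int) ∈ orb := pvOrbit_self_mem H _
        set assigned' := orb.foldl (fun a w => PySem.List.pySetD a w true) assigned with has'
        have hlen' : assigned'.length = nN := by rw [has', pvMark_length, hlen]
        have hfirst' : ∀ w : Nat, w < v + 1 → assigned'.getD w false = true := by
          intro w hw
          have hwn : w < nN := by omega
          rw [has', pvMark_getD orb assigned w (by rw [hlen]; exact horbB) (by omega)]
          rcases Nat.lt_succ_iff_lt_or_eq.mp hw with hw' | rfl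
          · exact Or.inl (hfirst w hw')
          · exact Or.inr ⟨(w : Int), hvorb, pvWrap_of_nonneg (by omega)⟩
        have hcast : ((v : Int) + 1) = ((v + 1 : Nat) : Int) := by push_cast; ring
        rw [hcast]
        exact ih (v + 1) assigned' (subs ++ [orb]) f (by omega) hlen' hfirst' (by omega)

theorem pvMain (gens : List (List Int)) (base : Int)
    (hpre : Pre_compute_suborbits_from_generators gens base) :
    compute_suborbits_from_generators gens base = compute_suborbits_from_generators_alt gens base := by
  obtain ⟨hne, hrows, hb1, hb2⟩ := hpre
  cases gens with
  | nil => exact absurd rfl hne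
  | cons g0 t =>
    simp only [List.headD_cons] at hrows hb1 hb2
    set nN := g0.length with hnN
    have hn : (0 : Int) < (nN : Int) := by omega
    -- the shared front end
    set rep := pvPointBfs (g0 :: t) ((nN : Int)) base with hrep
    set H := pvSchreier (g0 :: t) rep base with hH
    -- all rep values map into [-nN, nN)
    have hvals : ∀ p ∈ rep.values, ∀ x ∈ p, -(nN : Int) ≤ x ∧ x < (nN : Int) := by
      rw [hrep]
      unfold pvPointBfs
      intro p hp
      refine pvBfsLoop_values (g0 :: t) (fun p => ∀ x ∈ p, -(nN : Int) ≤ x ∧ x < (nN : Int)) ?_ _ _ _ ?_ p hp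
      · intro g hg pu x hx
        rcases pvCompose_mem g pu x hx with rfl | hxg
        · constructor <;> omega
        · exact (hrows g hg).2 x hxg
      · intro q hq x hx
        have hval : (PySem.Dict.ofList [(base, PySem.List.pyRange 0 (nN : Int) 1)]).values
            = [PySem.List.pyRange 0 (nN : Int) 1] := rfl
        rw [hval] at hq
        simp only [List.mem_singleton] at hq
        subst hq
        have := PySem.List.mem_pyRange_one.mp hx
        constructor <;> omega
    -- Schreier generators map into [-nN, nN)
    have HE : ∀ g ∈ H, ∀ x ∈ g, -(nN : Int) ≤ x ∧ x < (nN : Int) := by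
      intro g hg x hx
      obtain ⟨tu, htu, y, rfl⟩ := pvSchreier_mem _ _ _ g hg
      rcases pvCompose_mem tu y x hx with rfl | hxt
      · constructor <;> omega
      · exact hvals tu htu x hxt
    -- the grouping loops agree
    have key : ((PySem.List.pyRange 0 (nN : Int) 1).foldl
        (fun (st : List Bool × List (List Int)) x =>
          if PySem.List.pyGetD st.1 x false then st
          else
            let orb := pvOrbit H x
            (orb.foldl (fun a w => PySem.List.pySetD a w true) st.1, st.2 ++ [orb]))
        (List.replicate nN false, [])).2
        = pvWhileLoop H (nN + 1) (List.replicate nN false) [] := by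
      have := pvGrp H nN HE nN 0 (List.replicate nN false) [] (nN + 1)
        (by omega) (by simp) (by intro w hw; omega) (by omega)
      simpa using this
    -- assemble
    show PySem.List.sorted2 _ _ _ false = PySem.List.sorted2 _ _ _ false
    simp only [PySem.List.pyGetD_zero_cons, PySem.List.len_eq]
    rw [← hrep, ← hH]
    have htn : ((nN : Int)).toNat = nN := Int.toNat_natCast nN
    rw [htn]
    exact congrArg (fun l => PySem.List.sorted2 l (fun s => !(s.contains 0)) (fun s => PySem.List.len s) false) key

-- ===== VERDICT (by name: the statement is the Claim_ definition above) =====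
theorem compute_suborbits_from_generators_spec : Claim_equal_compute_suborbits_from_generators := by
  intro gens base _ hpre
  unfold Spec_compute_suborbits_from_generators
  exact pvMain gens base hpre
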